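-- pv_equiv track=rewrite | github.com/miejejaw/Competitive-programming | codeforces-solutions/F_Little_Girl_and_Maximum_XOR.py | solve
-- ===== SOURCE A (Python) =====
-- def solve(num):
--     p = 0
--     res = 0
--     while num:
--         res += 2**p
--         p += 1
--         num >>= 1
--     return res
-- ===== SOURCE B (Python) =====
-- def solve(num):
--     return (1 << num.bit_length()) - 1
-- ===== Notes on version B (the rewrite author's own statement) =====
-- stated objective: idiomatic
-- what changed: Replaces the bit-by-bit while-loop accumulating powers of two with the closed form (1 << num.bit_length()) - 1.
import Mathlib
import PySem

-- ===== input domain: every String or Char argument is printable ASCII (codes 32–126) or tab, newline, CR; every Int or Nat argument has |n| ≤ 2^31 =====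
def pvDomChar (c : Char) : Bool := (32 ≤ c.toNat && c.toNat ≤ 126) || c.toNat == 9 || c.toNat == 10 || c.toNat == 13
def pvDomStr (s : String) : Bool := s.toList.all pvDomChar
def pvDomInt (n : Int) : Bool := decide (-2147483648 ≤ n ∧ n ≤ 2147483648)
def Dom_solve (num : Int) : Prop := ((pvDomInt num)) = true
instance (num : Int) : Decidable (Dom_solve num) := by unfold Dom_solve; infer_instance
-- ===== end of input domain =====

-- B replaces A's bit-counting loop by the closed form (1 << bit_length) - 1 (idiomatic, no loop).

-- ===== PORT A =====
-- A's while-loop: res += 2**p; p += 1; num >>= 1.  The loop is ported on num.toNat: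
-- for the admitted inputs (Pre_solve: 0 ≤ num) this is exactly Python's computation;
-- on negative num Python A never terminates, which Pre_solve excludes.
def solveLoop (n : Nat) (p : Nat) (res : Int) : Int :=
  if n = 0 then res else solveLoop (n >>> 1) (p + 1) (res + 2 ^ p)

def solve (num : Int) : Int := solveLoop num.toNat 0 0

-- ===== PORT B =====
-- Source B: (1 << num.bit_length()) - 1; bit_length is ported as Nat.size of |num|.
def solve_alt (num : Int) : Int := (1 <<< (Nat.size num.natAbs) : Int) - 1

-- ===== PRECONDITION & SPEC =====
-- Pre_ excludes negative num, on which the Python A loops forever (num >>= 1 never reaches 0).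
def Pre_solve (num : Int) : Prop := 0 ≤ num
instance (num : Int) : Decidable (Pre_solve num) := by unfold Pre_solve; infer_instance
def pvWitness_solve : Int := (6)

def Spec_solve (num : Int) (out : Int) : Prop := out = solve_alt num
instance (num : Int) (out : Int) : Decidable (Spec_solve num out) := by unfold Spec_solve; infer_instance

-- ===== CLAIM (what is proved, stated in full; the proofs are below) =====
def Claim_equal_solve : Prop := ∀ (num : Int), Dom_solve num → Pre_solve num → Spec_solve num (solve num)

-- ===== LEMMAS AND PROOFS =====

theorem size_of_half (n : Nat) (h : n ≠ 0) : Nat.size n = Nat.size (n >>> 1) + 1 := by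
  conv_lhs => rw [← Nat.bit_testBit_zero_shiftRight_one n]
  rw [Nat.size_bit (by rw [Nat.bit_testBit_zero_shiftRight_one]; exact h)]

theorem solveLoop_eq (n : Nat) : ∀ (p : Nat) (res : Int),
    solveLoop n p res = res + 2 ^ p * (2 ^ Nat.size n - 1) := by
  induction n using Nat.strong_induction_on with
  | _ n ih =>
    intro p res
    rw [solveLoop]
    by_cases h : n = 0
    · simp [h]
    · rw [if_neg h, ih (n >>> 1)
        (by rw [Nat.shiftRight_one]; exact Nat.div_lt_self (Nat.pos_of_ne_zero h) one_lt_two)]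
      rw [size_of_half n h]
      ring

-- ===== VERDICT (by name: the statement is the Claim_ definition above) =====
theorem solve_spec : Claim_equal_solve := by
  intro num _ hpre
  unfold Spec_solve solve solve_alt
  rw [solveLoop_eq]
  have hp : 0 ≤ num := hpre
  have h1 : num.toNat = num.natAbs := by omega
  rw [h1]
  simp [Nat.shiftLeft_eq]
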